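-- pv_equiv track=rewrite | github.com/pypi-data/pypi-mirror-398 | packages/arcade-google-sheets/arcade_google_sheets-5.1.0-py3-none-any.whl/arcade_google_sheets/utils.py | group_contiguous_rows
-- ===== SOURCE A (Python) =====
-- def group_contiguous_rows(row_numbers: list[int]) -> list[list[int]]:
--     """Groups a sorted list of row numbers into contiguous groups
--
--     A contiguous group is a list of row numbers that are consecutive integers.
--     For example, [1,2,3,5,6] is converted to [[1,2,3],[5,6]].
--
--     Args:
--         row_numbers (list[int]): The list of row numbers to group.
--
--     Returns:
--         list[list[int]]: The grouped row numbers.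
--     """
--     if not row_numbers:
--         return []
--     groups = []
--     current_group = [row_numbers[0]]
--     for r in row_numbers[1:]:
--         if r == current_group[-1] + 1:
--             current_group.append(r)
--         else:
--             groups.append(current_group)
--             current_group = [r]
--     groups.append(current_group)
--     return groups
-- ===== SOURCE B (Python) =====
-- def group_contiguous_rows(row_numbers: list[int]) -> list[list[int]]:
--     """Groups a sorted list of row numbers into contiguous groups.
--
--     Two-pointer scan: advance j to the end of the consecutive run starting
--     at i, slice it out, and continue from j.  No accumulator/flush state.
--     """
--     groups = []
--     n = len(row_numbers)
--     i = 0
--     while i < n: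
--         j = i + 1
--         while j < n and row_numbers[j] == row_numbers[j - 1] + 1:
--             j += 1
--         groups.append(row_numbers[i:j])
--         i = j
--     return groups
-- ===== Notes on version B (the rewrite author's own statement) =====
-- stated objective: alternative
-- what changed: Replaced the accumulator/flush state machine (groups + current_group with an append-or-flush branch) by a two-pointer index scan that advances j to the end of each consecutive run and slices row_numbers[i:j] out directly.
import Mathlib
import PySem

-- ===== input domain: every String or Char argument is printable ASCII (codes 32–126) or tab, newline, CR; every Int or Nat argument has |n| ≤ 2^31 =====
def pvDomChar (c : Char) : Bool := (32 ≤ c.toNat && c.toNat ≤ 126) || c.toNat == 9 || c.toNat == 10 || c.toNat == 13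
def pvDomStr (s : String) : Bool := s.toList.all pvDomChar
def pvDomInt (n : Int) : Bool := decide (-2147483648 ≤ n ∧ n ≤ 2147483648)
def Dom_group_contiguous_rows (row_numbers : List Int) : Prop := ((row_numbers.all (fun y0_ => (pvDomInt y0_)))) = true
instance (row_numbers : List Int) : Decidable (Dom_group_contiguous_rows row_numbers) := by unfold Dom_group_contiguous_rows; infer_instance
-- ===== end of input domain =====

-- B replaces A's accumulator/flush state machine by a two-pointer scan that slices out each run (alternative, same cost).

-- ===== PORT A =====
-- the for-loop over row_numbers[1:] with state (groups, current_group); current_group[-1] is pyGetD (never empty here)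
def groupContiguousLoop (groups : List (List Int)) (cur : List Int) : List Int → List (List Int)
  | [] => groups ++ [cur]
  | r :: rest =>
    if r = PySem.List.pyGetD cur (-1) 0 + 1 then
      groupContiguousLoop groups (cur ++ [r]) rest
    else
      groupContiguousLoop (groups ++ [cur]) [r] rest

def group_contiguous_rows (row_numbers : List Int) : List (List Int) :=
  match row_numbers with
  | [] => []
  | x :: xs => groupContiguousLoop [] [x] xs

-- ===== PORT B =====
-- inner while: advance j to the end of the consecutive run (row_numbers[j] is pyGetD; always in range here)
def runEndLoop (l : List Int) (n : Nat) (j : Nat) : Nat :=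
  if h : j < n ∧ PySem.List.pyGetD l (j : Int) 0 = PySem.List.pyGetD l ((j : Int) - 1) 0 + 1 then
    runEndLoop l n (j + 1)
  else j
termination_by n - j
decreasing_by omega

-- the inner while never moves j backwards (termination of the outer while)
theorem runEndLoop_ge (l : List Int) (n : Nat) : ∀ j, j ≤ runEndLoop l n j := by
  intro j
  induction hk : n - j using Nat.strong_induction_on generalizing j with
  | _ k ih =>
    rw [runEndLoop]
    split
    · next h => exact le_trans (by omega) (ih (n - (j + 1)) (by omega) (j + 1) rfl)
    · exact le_refl j

-- outer while with state (groups, i); row_numbers[i:j] is PySem.List.slice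
def groupScanLoop (l : List Int) (n : Nat) (i : Nat) (groups : List (List Int)) : List (List Int) :=
  if h : i < n then
    let j := runEndLoop l n (i + 1)
    groupScanLoop l n j (groups ++ [PySem.List.slice l (some (i : Int)) (some (j : Int))])
  else groups
termination_by n - i
decreasing_by have := runEndLoop_ge l n (i + 1); omega

def group_contiguous_rows_alt (row_numbers : List Int) : List (List Int) :=
  groupScanLoop row_numbers row_numbers.length 0 []

-- ===== PRECONDITION & SPEC =====
def Spec_group_contiguous_rows (row_numbers : List Int) (out : List (List Int)) : Prop := out = group_contiguous_rows_alt row_numbers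
instance (row_numbers : List Int) (out : List (List Int)) : Decidable (Spec_group_contiguous_rows row_numbers out) := by unfold Spec_group_contiguous_rows; infer_instance

-- ===== CLAIM (what is proved, stated in full; the proofs are below) =====
def Claim_equal_group_contiguous_rows : Prop := ∀ (row_numbers : List Int), Dom_group_contiguous_rows row_numbers → Spec_group_contiguous_rows row_numbers (group_contiguous_rows row_numbers)

-- ===== LEMMAS AND PROOFS =====

-- canonical head-run grouping, the bridge both ports are proved equal to
def leadingRun (prev : Int) : List Int → List Int
  | [] => []
  | x :: xs => if x = prev + 1 then x :: leadingRun x xs else []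

def altRec : List Int → List (List Int)
  | [] => []
  | x :: xs =>
    let run := leadingRun x xs
    ([x] ++ run) :: altRec (xs.drop run.length)
termination_by l => l.length
decreasing_by simp

theorem altRec_nil : altRec [] = [] := by
  rw [altRec.eq_def]

theorem altRec_cons (x : Int) (xs : List Int) :
    altRec (x :: xs) =
      (x :: leadingRun x xs) :: altRec (xs.drop (leadingRun x xs).length) := by
  conv_lhs => rw [altRec.eq_def]
  rfl

theorem leadingRun_take (prev : Int) (xs : List Int) :
    leadingRun prev xs = xs.take (leadingRun prev xs).length := by
  induction xs generalizing prev with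
  | nil => simp [leadingRun]
  | cons x xs ih =>
    rw [leadingRun]
    split
    · simpa using ih x
    · simp

-- A's loop computes the head-run grouping
theorem loop_eq_altRec (l : List Int) : ∀ (groups : List (List Int)) (cur : List Int) (_ : cur ≠ []),
    groupContiguousLoop groups cur l =
      groups ++ ((cur ++ leadingRun (PySem.List.pyGetD cur (-1) 0) l) ::
        altRec (l.drop (leadingRun (PySem.List.pyGetD cur (-1) 0) l).length)) := by
  induction l with
  | nil => intro groups cur hcur; simp [groupContiguousLoop, leadingRun, altRec_nil]
  | cons r rest ih =>
    intro groups cur hcur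
    by_cases h : r = PySem.List.pyGetD cur (-1) 0 + 1
    · rw [groupContiguousLoop, if_pos h, ih groups (cur ++ [r]) (by simp)]
      simp [leadingRun, h, PySem.List.pyGetD_neg_one_append_singleton]
    · rw [groupContiguousLoop, if_neg h, ih (groups ++ [cur]) [r] (by simp)]
      have hr : PySem.List.pyGetD [r] (-1) 0 = r := by
        simpa using PySem.List.pyGetD_neg_one_append_singleton (xs := ([] : List Int)) (x := r) (d := 0)
      rw [leadingRun, if_neg h]
      simp only [hr]
      simp only [List.length_nil, List.drop_zero]
      rw [altRec_cons]
      simp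

-- B's inner while ends exactly past the leading run
theorem runEndLoop_eq (l : List Int) : ∀ (j : Nat), 1 ≤ j →
    runEndLoop l l.length j = j + (leadingRun (l.getD (j - 1) 0) (l.drop j)).length := by
  intro j
  induction hk : l.length - j using Nat.strong_induction_on generalizing j with
  | _ k ih =>
    intro hj
    rw [runEndLoop]
    by_cases hlt : j < l.length
    · have hdrop : l.drop j = l[j] :: l.drop (j + 1) := List.drop_eq_getElem_cons hlt
      have hcast : ((j : Int) - 1) = ((j - 1 : Nat) : Int) := by omega
      have hgj : PySem.List.pyGetD l (j : Int) 0 = l[j] := by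
        simp [PySem.List.pyGetD_natCast, List.getElem?_eq_getElem hlt]
      by_cases hv : l[j] = l.getD (j - 1) 0 + 1
      · rw [dif_pos ⟨hlt, by rw [hgj, hcast, PySem.List.pyGetD_natCast]; exact hv⟩]
        rw [ih (l.length - (j + 1)) (by omega) (j + 1) rfl (by omega)]
        rw [hdrop, leadingRun, if_pos hv]
        have : (j + 1 - 1) = j := by omega
        rw [this, List.getD_eq_getElem _ _ hlt]
        simp; omega
      · rw [dif_neg (by rw [hgj, hcast, PySem.List.pyGetD_natCast]; exact fun hc => hv hc.2)]
        rw [hdrop, leadingRun, if_neg hv]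
        simp
    · rw [dif_neg (fun hc => hlt hc.1)]
      rw [List.drop_eq_nil_of_le (by omega)]
      simp [leadingRun]

-- B's outer while computes the head-run grouping of the remaining suffix
theorem scan_eq_altRec (l : List Int) : ∀ (k i : Nat) (groups : List (List Int)), l.length - i = k →
    groupScanLoop l l.length i groups = groups ++ altRec (l.drop i) := by
  intro k
  induction k using Nat.strong_induction_on with
  | _ k ih =>
    intro i groups hk
    rw [groupScanLoop]
    by_cases hlt : i < l.length
    · rw [dif_pos hlt]
      have hdrop : l.drop i = l[i] :: l.drop (i + 1) := List.drop_eq_getElem_cons hlt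
      have hrun := runEndLoop_eq l (i + 1) (by omega)
      have hsimp : (i + 1 - 1) = i := by omega
      rw [hsimp, List.getD_eq_getElem _ _ hlt] at hrun
      set run := leadingRun l[i] (l.drop (i + 1)) with hrundef
      have hge := runEndLoop_ge l l.length (i + 1)
      have hslice : PySem.List.slice l (some (i : Int)) (some ((runEndLoop l l.length (i + 1) : Nat) : Int)) =
          l[i] :: run := by
        rw [PySem.List.slice_natCast, hrun, hdrop]
        have : i + 1 + run.length - i = run.length + 1 := by omega
        rw [this, List.take_succ_cons]
        congr 1
        have hpref := leadingRun_take l[i] (l.drop (i + 1))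
        rw [← hrundef] at hpref
        exact hpref.symm
      rw [ih (l.length - runEndLoop l l.length (i + 1)) (by omega) _ _ rfl]
      rw [hslice, hdrop, altRec_cons]
      have hdd : List.drop (runEndLoop l l.length (i + 1)) l = List.drop run.length (l.drop (i + 1)) := by
        rw [List.drop_drop, hrun]
      rw [hdd, ← hrundef]
      simp
    · rw [dif_neg hlt]
      rw [List.drop_eq_nil_of_le (by omega)]
      simp [altRec_nil]

-- ===== VERDICT (by name: the statement is the Claim_ definition above) =====
theorem group_contiguous_rows_spec : Claim_equal_group_contiguous_rows := by
  intro row_numbers _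
  unfold Spec_group_contiguous_rows group_contiguous_rows_alt
  rw [scan_eq_altRec row_numbers (row_numbers.length - 0) 0 [] rfl]
  match row_numbers with
  | [] => simp [group_contiguous_rows, altRec_nil]
  | x :: xs =>
    rw [group_contiguous_rows, loop_eq_altRec xs [] [x] (by simp)]
    have hx : PySem.List.pyGetD [x] (-1) 0 = x := by
      simpa using PySem.List.pyGetD_neg_one_append_singleton (xs := ([] : List Int)) (x := x) (d := 0)
    rw [hx]
    simp only [List.drop_zero]
    rw [altRec_cons]
    simp
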